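-- pv_equiv track=rewrite | github.com/oouyang/xsw | scripts/analyze_puzzles.py | is_split
-- ===== SOURCE A (Python) =====
-- from collections import deque
--
-- def get_4neighbors(cell):
--     """Return 4-adjacent neighbors of cell on 8x8 board."""
--     r, c = divmod(cell, 8)
--     neighbors = []
--     if r > 0:
--         neighbors.append((r - 1) * 8 + c)
--     if r < 7:
--         neighbors.append((r + 1) * 8 + c)
--     if c > 0:
--         neighbors.append(r * 8 + c - 1)
--     if c < 7:
--         neighbors.append(r * 8 + c + 1)
--     return neighbors
--
-- def flood_fill_count(free_cells_set, start):
--     """Flood fill from start, return set of reachable cells."""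
--     visited = set()
--     queue = deque([start])
--     visited.add(start)
--     while queue:
--         cell = queue.popleft()
--         for nb in get_4neighbors(cell):
--             if nb in free_cells_set and nb not in visited:
--                 visited.add(nb)
--                 queue.append(nb)
--     return visited
--
-- def is_split(grey_set):
--     """Check if grey cells split the free space into 2+ disconnected regions,
--     OR if all grey cells share a single row or column."""
--     free = set(range(64)) - grey_set
--     if not free:
--         return False
--
--     # Flood fill from first free cell
--     start = next(iter(free))
--     reached = flood_fill_count(free, start)
--     if len(reached) < len(free):
--         return True
--
--     # Also classify as split if all grey cells share a row or column
--     rows = set(c // 8 for c in grey_set)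
--     cols = set(c % 8 for c in grey_set)
--     if len(rows) == 1 or len(cols) == 1:
--         return True
--
--     return False
-- ===== SOURCE B (Python) =====
-- def is_split(grey_set):
--     """Check if grey cells split the free space into 2+ disconnected regions,
--     OR if all grey cells share a single row or column.
--
--     Re-implementation: instead of a BFS with a queue, run a fixed number (64)
--     of whole-board relaxation sweeps: each sweep adds every free cell adjacent
--     to an already-marked cell.  64 sweeps always reach the fixed point, since
--     each sweep before the fixed point marks at least one new cell and there
--     are at most 64 free cells."""
--     grey = set(grey_set)
--     free = [c for c in range(64) if c not in grey]
--     if not free: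
--         return False
--
--     marked = {free[0]}
--     for _ in range(64):
--         marked = marked | {c for c in free
--                            if c not in marked and
--                               ((c % 8 > 0 and c - 1 in marked) or
--                                (c % 8 < 7 and c + 1 in marked) or
--                                (c >= 8 and c - 8 in marked) or
--                                (c < 56 and c + 8 in marked))}
--     if len(marked) < len(free):
--         return True
--
--     rows = set(c // 8 for c in grey_set)
--     cols = set(c % 8 for c in grey_set)
--     return len(rows) == 1 or len(cols) == 1
-- ===== Notes on version B (the rewrite author's own statement) =====
-- stated objective: alternative
-- what changed: The deque-based BFS flood fill is replaced by a fixed count of 64 whole-board relaxation sweeps (each sweep marks every free cell adjacent to a marked cell), which provably reaches the connected component without a queue or a convergence test; the row/column check over grey_set is kept verbatim.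
import Mathlib
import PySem

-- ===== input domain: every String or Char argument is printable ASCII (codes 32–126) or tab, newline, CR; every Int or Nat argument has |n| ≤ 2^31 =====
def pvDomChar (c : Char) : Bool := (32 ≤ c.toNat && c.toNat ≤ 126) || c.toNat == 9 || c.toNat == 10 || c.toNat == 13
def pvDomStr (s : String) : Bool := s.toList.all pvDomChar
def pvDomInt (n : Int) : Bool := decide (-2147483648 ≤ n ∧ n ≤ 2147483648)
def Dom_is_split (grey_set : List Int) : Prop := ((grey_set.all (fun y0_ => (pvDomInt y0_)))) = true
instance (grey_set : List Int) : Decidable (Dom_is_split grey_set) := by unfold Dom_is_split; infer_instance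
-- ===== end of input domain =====

-- B replaces A's deque-based BFS flood fill by a fixed count of 64 whole-board relaxation
-- sweeps (objective: alternative, same observable result; not claimed faster).

-- ===== PORT A =====

-- r, c = divmod(cell, 8); conditional appends of the four neighbours
def get_4neighbors (cell : Int) : List Int :=
  let r := PySem.Int.floordiv cell 8
  let c := PySem.Int.mod cell 8
  ((if r > 0 then [(r - 1) * 8 + c] else []) ++
   (if r < 7 then [(r + 1) * 8 + c] else []) ++
   (if c > 0 then [r * 8 + c - 1] else []) ++
   (if c < 7 then [r * 8 + c + 1] else []))

-- body of A's inner loop 'for nb in get_4neighbors(cell)': state = (visited, queue)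
def bfsPush (F : List Int) (st : List Int × List Int) (nb : Int) : List Int × List Int :=
  if nb ∈ F ∧ nb ∉ st.1 then (st.1 ++ [nb], st.2 ++ [nb]) else st

-- A's BFS while-loop ('while queue: cell = queue.popleft(); for nb in …').  The fuel
-- argument is only a totality guard: F.length + 2 iterations always suffice (proved in
-- the lemmas below), so the port computes exactly what A's loop computes.
def bfsGo (F : List Int) : Nat → List Int → List Int → List Int
  | 0, visited, _ => visited
  | fuel + 1, visited, queue =>
    match queue with
    | [] => visited
    | cell :: rest =>
      let st := (get_4neighbors cell).foldl (bfsPush F) (visited, rest)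
      bfsGo F fuel st.1 st.2

-- flood_fill_count(free, start)
def flood_fill_count (F : List Int) (start : Int) : List Int :=
  bfsGo F (F.length + 2) [start] [start]

-- free = set(range(64)) - grey_set  (insertion order: ascending)
def freeA (grey_set : List Int) : List Int :=
  PySem.Set.diff (PySem.Set.ofList (PySem.List.pyRange 0 64 1)) grey_set

-- is_split: BFS flood fill, then the row/column check.  'next(iter(free))' is ported as the
-- first free cell; the returned value does not depend on which free cell the fill starts from.
def is_split (grey_set : List Int) : Bool :=
  if hfree : freeA grey_set = [] then false
  else
    if (flood_fill_count (freeA grey_set) ((freeA grey_set).head hfree)).length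
         < (freeA grey_set).length then true
    else if (PySem.Set.ofList (grey_set.map (fun c => PySem.Int.floordiv c 8))).length = 1 ∨
            (PySem.Set.ofList (grey_set.map (fun c => PySem.Int.mod c 8))).length = 1 then true
    else false

-- ===== PORT B =====

-- B's neighbour test: some already-marked cell is 4-adjacent to c (inlined border checks)
def bcond (c : Int) (m : List Int) : Bool :=
  (decide (0 < PySem.Int.mod c 8) && m.contains (c - 1)) ||
  (decide (PySem.Int.mod c 8 < 7) && m.contains (c + 1)) ||
  (decide (8 ≤ c) && m.contains (c - 8)) ||
  (decide (c < 56) && m.contains (c + 8))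

-- one sweep: marked | {c for c in free if c not in marked and <neighbour marked>}
def sweep (free m : List Int) : List Int :=
  m ++ free.filter (fun c => !m.contains c && bcond c m)

-- 'for _ in range(64)': n sweeps, no queue and no convergence test
def sweeps (free : List Int) : Nat → List Int → List Int
  | 0, m => m
  | n + 1, m => sweeps free n (sweep free m)

-- free = [c for c in range(64) if c not in set(grey_set)]
def freeB (grey_set : List Int) : List Int :=
  (PySem.List.pyRange 0 64 1).filter
    (fun c => !(PySem.Set.contains (PySem.Set.ofList grey_set) c))

def is_split_alt (grey_set : List Int) : Bool :=
  match freeB grey_set with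
  | [] => false
  | s :: _ =>
    if (sweeps (freeB grey_set) 64 [s]).length < (freeB grey_set).length then true
    else decide ((PySem.Set.ofList (grey_set.map (fun c => PySem.Int.floordiv c 8))).length = 1 ∨
                 (PySem.Set.ofList (grey_set.map (fun c => PySem.Int.mod c 8))).length = 1)

-- ===== PRECONDITION & SPEC =====
def Spec_is_split (grey_set : List Int) (out : Bool) : Prop := out = is_split_alt grey_set
instance (grey_set : List Int) (out : Bool) : Decidable (Spec_is_split grey_set out) := by unfold Spec_is_split; infer_instance

-- ===== CLAIM (what is proved, stated in full; the proofs are below) =====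
def Claim_equal_is_split : Prop := ∀ (grey_set : List Int), Dom_is_split grey_set → Spec_is_split grey_set (is_split grey_set)

-- ===== LEMMAS AND PROOFS =====

-- membership in the visited component after the inner loop
lemma bfsPush_fold_mem (F : List Int) (nbs : List Int) : ∀ (st : List Int × List Int) (x : Int),
    x ∈ (nbs.foldl (bfsPush F) st).1 ↔ x ∈ st.1 ∨ (x ∈ nbs ∧ x ∈ F) := by
  induction nbs with
  | nil => intro st x; simp
  | cons nb nbs ih =>
    intro st x
    simp only [List.foldl_cons, List.mem_cons]
    by_cases h : nb ∈ F ∧ nb ∉ st.1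
    · rw [bfsPush, if_pos h, ih]
      simp only [List.mem_append, List.mem_cons, List.not_mem_nil, or_false]
      constructor
      · rintro ((hx | rfl) | ⟨hx, hxF⟩)
        · exact Or.inl hx
        · exact Or.inr ⟨Or.inl rfl, h.1⟩
        · exact Or.inr ⟨Or.inr hx, hxF⟩
      · rintro (hx | ⟨rfl | hx, hxF⟩)
        · exact Or.inl (Or.inl hx)
        · exact Or.inl (Or.inr rfl)
        · exact Or.inr ⟨hx, hxF⟩
    · rw [bfsPush, if_neg h, ih]
      constructor
      · rintro (hx | ⟨hx, hxF⟩)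
        · exact Or.inl hx
        · exact Or.inr ⟨Or.inr hx, hxF⟩
      · rintro (hx | ⟨rfl | hx, hxF⟩)
        · exact Or.inl hx
        · rcases not_and_or.1 h with h' | h'
          · exact absurd hxF h'
          · exact Or.inl (not_not.1 h')
        · exact Or.inr ⟨hx, hxF⟩

lemma contains_ofList_eq (g : List Int) (c : Int) :
    PySem.Set.contains (PySem.Set.ofList g) c = PySem.Set.contains g c := by
  by_cases h : c ∈ g
  · rw [(PySem.Set.contains_iff _ _).2 ((PySem.Set.mem_ofList _ _).2 h),
        (PySem.Set.contains_iff _ _).2 h]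
  · have h1 : ¬ PySem.Set.contains (PySem.Set.ofList g) c = true :=
      fun hh => h ((PySem.Set.mem_ofList _ _).1 ((PySem.Set.contains_iff _ _).1 hh))
    have h2 : ¬ PySem.Set.contains g c = true :=
      fun hh => h ((PySem.Set.contains_iff _ _).1 hh)
    rw [Bool.not_eq_true] at h1 h2
    rw [h1, h2]

lemma free_eq (g : List Int) : freeB g = freeA g := by
  rw [freeA, freeB]
  have h0 : PySem.Set.ofList (PySem.List.pyRange 0 64 1) = PySem.List.pyRange 0 64 1 :=
    PySem.Set.ofList_eq_self_of_nodup _ (PySem.List.nodup_pyRange_one 0 64)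
  rw [h0]
  show _ = (PySem.List.pyRange 0 64 1).filter (fun x => !(PySem.Set.contains g x))
  exact List.filter_congr (fun c _ => by rw [contains_ofList_eq])

lemma freeB_nodup (g : List Int) : (freeB g).Nodup :=
  List.Nodup.filter _ (PySem.List.nodup_pyRange_one 0 64)

lemma freeB_bounds (g : List Int) : ∀ c ∈ freeB g, 0 ≤ c ∧ c < 64 := by
  intro c hc
  have := (List.mem_filter.1 hc).1
  have h := PySem.List.mem_pyRange_one.1 this
  omega

lemma freeB_len (g : List Int) : (freeB g).length ≤ 64 := by
  have h1 : (freeB g).length ≤ (PySem.List.pyRange 0 64 1).length := List.length_filter_le _ _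
  have h2 : (PySem.List.pyRange 0 64 1).length = 64 := by decide
  omega

-- adjacency on the 8x8 board restricted to the free cells, and reachability
def Adj (F : List Int) (a b : Int) : Prop := b ∈ get_4neighbors a ∧ b ∈ F
def Reach (F : List Int) (s : Int) : Int → Prop := Relation.ReflTransGen (Adj F) s

lemma mem_ite_singleton {p : Prop} [Decidable p] (a x : Int) :
    (x ∈ if p then [a] else ([] : List Int)) ↔ p ∧ x = a := by
  split <;> simp_all

-- arithmetic characterisation of get_4neighbors on the board
lemma mem_get4 (c x : Int) (h0 : 0 ≤ c) (h64 : c < 64) :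
    x ∈ get_4neighbors c ↔
      (8 ≤ c ∧ x = c - 8) ∨ (c < 56 ∧ x = c + 8) ∨
      (0 < PySem.Int.mod c 8 ∧ x = c - 1) ∨ (PySem.Int.mod c 8 < 7 ∧ x = c + 1) := by
  have hd := PySem.Int.floordiv_mul_add_mod c 8
  have hm0 : 0 ≤ PySem.Int.mod c 8 := PySem.Int.mod_nonneg c (by norm_num)
  have hm8 : PySem.Int.mod c 8 < 8 := PySem.Int.mod_lt c (by norm_num)
  simp only [get_4neighbors, List.mem_append, mem_ite_singleton]
  omega

-- B's inlined neighbour shapes give real edges, and conversely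
lemma adj_of_shape (c d : Int) (hc0 : 0 ≤ c) (hc64 : c < 64) (hd0 : 0 ≤ d) (hd64 : d < 64)
    (h : (0 < PySem.Int.mod c 8 ∧ d = c - 1) ∨ (PySem.Int.mod c 8 < 7 ∧ d = c + 1) ∨
         (8 ≤ c ∧ d = c - 8) ∨ (c < 56 ∧ d = c + 8)) :
    c ∈ get_4neighbors d := by
  have hdc := PySem.Int.floordiv_mul_add_mod c 8
  have hmc0 : 0 ≤ PySem.Int.mod c 8 := PySem.Int.mod_nonneg c (by norm_num)
  have hmc8 : PySem.Int.mod c 8 < 8 := PySem.Int.mod_lt c (by norm_num)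
  have hdd := PySem.Int.floordiv_mul_add_mod d 8
  have hmd0 : 0 ≤ PySem.Int.mod d 8 := PySem.Int.mod_nonneg d (by norm_num)
  have hmd8 : PySem.Int.mod d 8 < 8 := PySem.Int.mod_lt d (by norm_num)
  rw [mem_get4 d c hd0 hd64]
  omega

lemma shape_of_adj (x nb : Int) (hx0 : 0 ≤ x) (hx64 : x < 64) (h : nb ∈ get_4neighbors x) :
    (0 < PySem.Int.mod nb 8 ∧ nb - 1 = x) ∨ (PySem.Int.mod nb 8 < 7 ∧ nb + 1 = x) ∨
    (8 ≤ nb ∧ nb - 8 = x) ∨ (nb < 56 ∧ nb + 8 = x) := by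
  have hdx := PySem.Int.floordiv_mul_add_mod x 8
  have hmx0 : 0 ≤ PySem.Int.mod x 8 := PySem.Int.mod_nonneg x (by norm_num)
  have hmx8 : PySem.Int.mod x 8 < 8 := PySem.Int.mod_lt x (by norm_num)
  have hdn := PySem.Int.floordiv_mul_add_mod nb 8
  have hmn0 : 0 ≤ PySem.Int.mod nb 8 := PySem.Int.mod_nonneg nb (by norm_num)
  have hmn8 : PySem.Int.mod nb 8 < 8 := PySem.Int.mod_lt nb (by norm_num)
  rw [mem_get4 x nb hx0 hx64] at h
  omega

-- ---- BFS (port A) characterisation ----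

-- invariant of the inner loop: the fold appends the same block to visited and queue
lemma bfsPush_fold_ex (F : List Int) (nbs : List Int) : ∀ st : List Int × List Int,
    ∃ new : List Int,
      (nbs.foldl (bfsPush F) st).1 = st.1 ++ new ∧
      (nbs.foldl (bfsPush F) st).2 = st.2 ++ new ∧
      (∀ x ∈ new, x ∈ F) ∧
      (st.1.Nodup → (st.1 ++ new).Nodup) := by
  induction nbs with
  | nil => exact fun st => ⟨[], by simp, by simp, by simp, fun h => by simpa using h⟩
  | cons nb nbs ih =>
    intro st
    simp only [List.foldl_cons]
    by_cases h : nb ∈ F ∧ nb ∉ st.1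
    · obtain ⟨new, h1, h2, h3, h4⟩ := ih (st.1 ++ [nb], st.2 ++ [nb])
      refine ⟨nb :: new, ?_, ?_, ?_, ?_⟩
      · rw [bfsPush, if_pos h] at *; simpa [List.append_assoc] using h1
      · rw [bfsPush, if_pos h] at *; simpa [List.append_assoc] using h2
      · intro x hx
        rcases List.mem_cons.1 hx with rfl | hx
        · exact h.1
        · exact h3 x hx
      · intro hnd
        have hone : (st.1 ++ [nb]).Nodup := by
          simp only [List.nodup_append, List.nodup_singleton, true_and, hnd]
          intro a ha b hb
          rw [List.mem_singleton] at hb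
          subst hb
          exact fun hab => h.2 (hab ▸ ha)
        have := h4 hone
        simpa [List.append_assoc] using this
    · obtain ⟨new, h1, h2, h3, h4⟩ := ih st
      exact ⟨new, by rwa [bfsPush, if_neg h], by rwa [bfsPush, if_neg h], h3, h4⟩

lemma bfsGo_mono (F : List Int) :
    ∀ (fuel : Nat) (visited queue : List Int), ∀ x ∈ visited, x ∈ bfsGo F fuel visited queue := by
  intro fuel
  induction fuel with
  | zero => intro v q x hx; exact hx
  | succ fuel ih =>
    intro v q x hx
    match q with
    | [] => exact hx
    | cell :: rest =>
      exact ih _ _ x ((bfsPush_fold_mem F (get_4neighbors cell) (v, rest) x).2 (Or.inl hx))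

lemma bfsGo_nodup (F : List Int) :
    ∀ (fuel : Nat) (visited queue : List Int), visited.Nodup → (bfsGo F fuel visited queue).Nodup := by
  intro fuel
  induction fuel with
  | zero => intro v q h; exact h
  | succ fuel ih =>
    intro v q h
    match q with
    | [] => exact h
    | cell :: rest =>
      obtain ⟨new, h1, -, -, h4⟩ := bfsPush_fold_ex F (get_4neighbors cell) (v, rest)
      exact ih _ _ (by rw [show ((get_4neighbors cell).foldl (bfsPush F) (v, rest)).1 = v ++ new from h1]; exact h4 h)

lemma bfsGo_P (P : Int → Prop) (F : List Int)
    (hstep : ∀ a b, P a → b ∈ get_4neighbors a → b ∈ F → P b) :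
    ∀ (fuel : Nat) (visited queue : List Int), (∀ x ∈ queue, x ∈ visited) →
      (∀ x ∈ visited, P x) → ∀ x ∈ bfsGo F fuel visited queue, P x := by
  intro fuel
  induction fuel with
  | zero => intro v q _ hP x hx; exact hP x hx
  | succ fuel ih =>
    intro v q hq hP x hx
    match q with
    | [] => exact hP x hx
    | cell :: rest =>
      obtain ⟨new, h1, h2, -, -⟩ := bfsPush_fold_ex F (get_4neighbors cell) (v, rest)
      refine ih _ _ ?_ ?_ x hx
      · intro y hy
        rw [h1]
        rw [h2] at hy
        rcases List.mem_append.1 hy with hy | hy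
        · exact List.mem_append_left _ (hq y (List.mem_cons_of_mem _ hy))
        · exact List.mem_append_right _ hy
      · intro y hy
        rcases (bfsPush_fold_mem F (get_4neighbors cell) (v, rest) y).1 hy with hyv | ⟨hyn, hyF⟩
        · exact hP y hyv
        · exact hstep cell y (hP cell (hq cell List.mem_cons_self)) hyn hyF

-- with enough fuel the loop runs to completion, so the result is neighbour-closed
lemma bfsGo_closed (F : List Int) :
    ∀ (fuel : Nat) (visited queue : List Int), visited.Nodup → (∀ x ∈ visited, x ∈ F) →
      (∀ x ∈ queue, x ∈ visited) →
      F.length + 1 - visited.length + queue.length ≤ fuel →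
      (∀ x ∈ visited, x ∈ queue ∨ ∀ nb, nb ∈ get_4neighbors x → nb ∈ F → nb ∈ visited) →
      ∀ x ∈ bfsGo F fuel visited queue, ∀ nb, nb ∈ get_4neighbors x → nb ∈ F →
        nb ∈ bfsGo F fuel visited queue := by
  intro fuel
  induction fuel with
  | zero =>
    intro v q hnd hvF hq hfuel hcl
    exfalso
    have hlen : v.length ≤ F.length := (List.subperm_of_subset hnd hvF).length_le
    omega
  | succ fuel ih =>
    intro v q hnd hvF hq hfuel hcl
    match q with
    | [] =>
      intro x hx nb h1 h2
      rcases hcl x hx with h | h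
      · cases h
      · exact h nb h1 h2
    | cell :: rest =>
      show ∀ x ∈ bfsGo F fuel _ _, _
      obtain ⟨new, he1, he2, he3, he4⟩ := bfsPush_fold_ex F (get_4neighbors cell) (v, rest)
      have hvF' : ∀ x ∈ v ++ new, x ∈ F := by
        intro x hx
        rcases List.mem_append.1 hx with hx | hx
        · exact hvF x hx
        · exact he3 x hx
      have hlen' : (v ++ new).length ≤ F.length :=
        (List.subperm_of_subset (he4 hnd) hvF').length_le
      refine ih _ _ (by rw [he1]; exact he4 hnd) (by rw [he1]; exact hvF') ?_ ?_ ?_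
      · rw [he1, he2]
        intro x hx
        rcases List.mem_append.1 hx with hx | hx
        · exact List.mem_append_left _ (hq x (List.mem_cons_of_mem _ hx))
        · exact List.mem_append_right _ hx
      · rw [he1, he2]
        simp only [List.length_append, List.length_cons] at *
        omega
      · rw [he1, he2]
        intro x hx
        by_cases hxv : x ∈ v
        · rcases hcl x hxv with hxq | hcx
          · rcases List.mem_cons.1 hxq with rfl | hxr
            · right
              intro nb hn1 hn2
              rw [← he1]
              exact (bfsPush_fold_mem F _ (v, rest) nb).2 (Or.inr ⟨hn1, hn2⟩)
            · left
              exact List.mem_append_left _ hxr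
          · right
            intro nb hn1 hn2
            rw [← he1]
            exact (bfsPush_fold_mem F _ (v, rest) nb).2 (Or.inl (hcx nb hn1 hn2))
        · left
          rcases List.mem_append.1 hx with hx | hx
          · exact absurd hx hxv
          · exact List.mem_append_right _ hx

lemma floodfill_mem (F : List Int) (s : Int) (hs : s ∈ F) :
    ∀ x, x ∈ flood_fill_count F s ↔ Reach F s x := by
  intro x
  rw [flood_fill_count]
  have hsq : ∀ y ∈ ([s] : List Int), y ∈ ([s] : List Int) := fun y hy => hy
  constructor
  · intro hx
    exact bfsGo_P (Reach F s) F
      (fun a b hra h1 h2 => hra.tail ⟨h1, h2⟩) (F.length + 2) [s] [s] hsq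
      (fun y hy => by rw [List.mem_singleton] at hy; subst hy; exact Relation.ReflTransGen.refl)
      x hx
  · intro hr
    have hFpos : 1 ≤ F.length := List.length_pos_of_mem hs
    have hfuel : F.length + 1 - ([s] : List Int).length + ([s] : List Int).length ≤ F.length + 2 := by
      simp only [List.length_singleton]
      omega
    induction hr with
    | refl => exact bfsGo_mono F (F.length + 2) [s] [s] s List.mem_cons_self
    | tail hab hbc ih =>
      exact bfsGo_closed F (F.length + 2) [s] [s] (List.nodup_singleton s)
        (by simpa using hs) hsq hfuel (fun y hy => Or.inl hy) _ ih _ hbc.1 hbc.2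

lemma floodfill_nodup (F : List Int) (s : Int) :
    (flood_fill_count F s).Nodup := by
  rw [flood_fill_count]; exact bfsGo_nodup F (F.length + 2) [s] [s] (List.nodup_singleton s)

-- ---- sweeps (port B) characterisation ----

lemma bcond_iff (c : Int) (m : List Int) :
    bcond c m = true ↔
      ((0 < PySem.Int.mod c 8 ∧ c - 1 ∈ m) ∨ (PySem.Int.mod c 8 < 7 ∧ c + 1 ∈ m) ∨
       (8 ≤ c ∧ c - 8 ∈ m) ∨ (c < 56 ∧ c + 8 ∈ m)) := by
  simp only [bcond, Bool.or_eq_true, Bool.and_eq_true, decide_eq_true_eq,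
    List.contains_iff_mem]
  tauto

lemma sweep_mono (free m : List Int) : ∀ x ∈ m, x ∈ sweep free m := by
  intro x hx; exact List.mem_append_left _ hx

lemma mem_sweep (free m : List Int) (x : Int) :
    x ∈ sweep free m ↔ x ∈ m ∨ (x ∈ free ∧ x ∉ m ∧ bcond x m = true) := by
  simp [sweep, List.mem_filter]

lemma sweep_nodup (free m : List Int) (hf : free.Nodup) (hm : m.Nodup) :
    (sweep free m).Nodup := by
  rw [sweep, List.nodup_append]
  refine ⟨hm, hf.filter _, ?_⟩
  intro a ha b hb hab
  subst hab
  have h2 := (List.mem_filter.1 hb).2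
  simp only [Bool.and_eq_true, Bool.not_eq_true'] at h2
  have : a ∉ m := by simpa using h2.1
  exact this ha

lemma sweep_subset (free m : List Int) (hm : ∀ x ∈ m, x ∈ free) :
    ∀ x ∈ sweep free m, x ∈ free := by
  intro x hx
  rcases (mem_sweep free m x).1 hx with hx | ⟨hx, -, -⟩
  · exact hm x hx
  · exact hx

-- a sweep that adds nothing is a genuine fixed point
lemma sweep_eq_self_iff (free m : List Int) :
    sweep free m = m ↔ ∀ c ∈ free, c ∉ m → bcond c m = false := by
  constructor
  · intro h c hc hcm
    by_contra hb
    have : c ∈ sweep free m := (mem_sweep free m c).2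
      (Or.inr ⟨hc, hcm, by revert hb; cases bcond c m <;> simp⟩)
    rw [h] at this
    exact hcm this
  · intro h
    rw [sweep]
    have : free.filter (fun c => !m.contains c && bcond c m) = [] := by
      rw [List.filter_eq_nil_iff]
      intro c hc
      by_cases hcm : c ∈ m
      · simp [hcm]
      · simp [hcm, h c hc hcm]
    rw [this, List.append_nil]

lemma sweeps_of_fixed (free m : List Int) (h : sweep free m = m) :
    ∀ n, sweeps free n m = m := by
  intro n
  induction n with
  | zero => rfl
  | succ n ih => rw [sweeps, h, ih]

lemma sweeps_mono (free : List Int) : ∀ (n : Nat) (m : List Int), ∀ x ∈ m, x ∈ sweeps free n m := by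
  intro n
  induction n with
  | zero => intro m x hx; exact hx
  | succ n ih => intro m x hx; exact ih (sweep free m) x (sweep_mono free m x hx)

lemma sweeps_nodup (free : List Int) (hf : free.Nodup) :
    ∀ (n : Nat) (m : List Int), m.Nodup → (sweeps free n m).Nodup := by
  intro n
  induction n with
  | zero => intro m hm; exact hm
  | succ n ih => intro m hm; exact ih (sweep free m) (sweep_nodup free m hf hm)

-- enough sweeps always reach the fixed point: each non-fixed sweep adds at least one cell
lemma sweeps_fixed (free : List Int) (hf : free.Nodup) :
    ∀ (n : Nat) (m : List Int), m.Nodup → (∀ x ∈ m, x ∈ free) →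
      free.length ≤ m.length + n →
      sweep free (sweeps free n m) = sweeps free n m := by
  intro n
  induction n with
  | zero =>
    intro m hm hsub hlen
    have hperm : ∀ c ∈ free, c ∈ m := by
      have hsp : m.Subperm free := List.subperm_of_subset hm hsub
      have : m.Perm free := hsp.perm_of_length_le (by omega)
      intro c hc
      exact this.mem_iff.2 hc
    rw [sweeps, sweep_eq_self_iff]
    intro c hc hcm
    exact absurd (hperm c hc) hcm
  | succ n ih =>
    intro m hm hsub hlen
    by_cases hfix : sweep free m = m
    · rw [sweeps, hfix, sweeps_of_fixed free m hfix, hfix]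
    · have hgrow : m.length + 1 ≤ (sweep free m).length := by
        rw [sweep, List.length_append]
        have : free.filter (fun c => !m.contains c && bcond c m) ≠ [] := by
          intro hnil
          exact hfix (by rw [sweep, hnil, List.append_nil])
        have := List.length_pos_of_ne_nil this
        omega
      rw [sweeps]
      exact ih (sweep free m) (sweep_nodup free m hf hm)
        (sweep_subset free m hsub) (by omega)

-- a property closed under marking a bcond-neighbour holds of everything a sweep marks
lemma sweep_P (P : Int → Prop) (free : List Int)
    (hadd : ∀ (m : List Int) (c : Int), (∀ x ∈ m, P x) → c ∈ free → bcond c m = true → P c)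
    (m : List Int) (hP : ∀ x ∈ m, P x) : ∀ x ∈ sweep free m, P x := by
  intro x hx
  rcases (mem_sweep free m x).1 hx with hx | ⟨hxf, -, hb⟩
  · exact hP x hx
  · exact hadd m x hP hxf hb

lemma sweeps_P (P : Int → Prop) (free : List Int)
    (hadd : ∀ (m : List Int) (c : Int), (∀ x ∈ m, P x) → c ∈ free → bcond c m = true → P c) :
    ∀ (n : Nat) (m : List Int), (∀ x ∈ m, P x) → ∀ x ∈ sweeps free n m, P x := by
  intro n
  induction n with
  | zero => intro m hP; exact hP
  | succ n ih => intro m hP; exact ih (sweep free m) (sweep_P P free hadd m hP)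

-- the 64 sweeps compute exactly the connected component of s in the free subgraph
lemma sweeps_char (free : List Int) (s : Int) (hf : free.Nodup)
    (hs : s ∈ free) (hbound : ∀ c ∈ free, 0 ≤ c ∧ c < 64) (hlen : free.length ≤ 64) :
    ∀ x, x ∈ sweeps free 64 [s] ↔ Reach free s x := by
  have hsound : ∀ x ∈ sweeps free 64 [s], x ∈ free ∧ Reach free s x := by
    apply sweeps_P (fun x => x ∈ free ∧ Reach free s x) free
    · intro m c hmP hcF hb
      refine ⟨hcF, ?_⟩
      obtain ⟨hc0, hc64⟩ := hbound c hcF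
      rcases (bcond_iff c m).1 hb with ⟨hcond, hd⟩ | ⟨hcond, hd⟩ | ⟨hcond, hd⟩ | ⟨hcond, hd⟩
      · obtain ⟨hdF, hdr⟩ := hmP _ hd
        obtain ⟨hd0, hd64⟩ := hbound _ hdF
        exact hdr.tail ⟨adj_of_shape c (c - 1) hc0 hc64 hd0 hd64 (Or.inl ⟨hcond, rfl⟩), hcF⟩
      · obtain ⟨hdF, hdr⟩ := hmP _ hd
        obtain ⟨hd0, hd64⟩ := hbound _ hdF
        exact hdr.tail ⟨adj_of_shape c (c + 1) hc0 hc64 hd0 hd64 (Or.inr (Or.inl ⟨hcond, rfl⟩)), hcF⟩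
      · obtain ⟨hdF, hdr⟩ := hmP _ hd
        obtain ⟨hd0, hd64⟩ := hbound _ hdF
        exact hdr.tail ⟨adj_of_shape c (c - 8) hc0 hc64 hd0 hd64
          (Or.inr (Or.inr (Or.inl ⟨hcond, rfl⟩))), hcF⟩
      · obtain ⟨hdF, hdr⟩ := hmP _ hd
        obtain ⟨hd0, hd64⟩ := hbound _ hdF
        exact hdr.tail ⟨adj_of_shape c (c + 8) hc0 hc64 hd0 hd64
          (Or.inr (Or.inr (Or.inr ⟨hcond, rfl⟩))), hcF⟩
    · intro x hx
      rw [List.mem_singleton] at hx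
      subst hx
      exact ⟨hs, Relation.ReflTransGen.refl⟩
  have hfix : sweep free (sweeps free 64 [s]) = sweeps free 64 [s] :=
    sweeps_fixed free hf 64 [s] (List.nodup_singleton s)
      (by intro x hx; rw [List.mem_singleton] at hx; subst hx; exact hs)
      (by simp; omega)
  have hclosed : ∀ c ∈ free, c ∉ sweeps free 64 [s] → bcond c (sweeps free 64 [s]) = false :=
    (sweep_eq_self_iff free _).1 hfix
  intro x
  constructor
  · intro hx; exact (hsound x hx).2
  · intro hr
    induction hr with
    | refl => exact sweeps_mono free 64 [s] s List.mem_cons_self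
    | @tail b c hab hbc ih =>
      obtain ⟨hcnb, hcF⟩ := hbc
      by_contra hc
      have hbF : b ∈ free := (hsound b ih).1
      obtain ⟨hb0, hb64⟩ := hbound b hbF
      have hfix' := hclosed c hcF hc
      have hbc' : bcond c (sweeps free 64 [s]) = true := by
        rw [bcond_iff]
        rcases shape_of_adj b c hb0 hb64 hcnb with ⟨hcond, hd⟩ | ⟨hcond, hd⟩ | ⟨hcond, hd⟩ | ⟨hcond, hd⟩
        · exact Or.inl ⟨hcond, by rw [hd]; exact ih⟩
        · exact Or.inr (Or.inl ⟨hcond, by rw [hd]; exact ih⟩)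
        · exact Or.inr (Or.inr (Or.inl ⟨hcond, by rw [hd]; exact ih⟩))
        · exact Or.inr (Or.inr (Or.inr ⟨hcond, by rw [hd]; exact ih⟩))
      rw [hfix'] at hbc'
      cases hbc'

-- ===== VERDICT (by name: the statement is the Claim_ definition above) =====
set_option maxRecDepth 4096 in
theorem is_split_spec : Claim_equal_is_split := by
  intro g _hdom
  show is_split g = is_split_alt g
  have hFE : freeB g = freeA g := free_eq g
  cases hfb : freeB g with
  | nil =>
    have hA : freeA g = [] := by rw [← hFE, hfb]
    unfold is_split is_split_alt
    rw [hfb, dif_pos hA]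
  | cons s rest =>
    have hA : freeA g ≠ [] := by rw [← hFE, hfb]; simp
    have hAE : freeA g = s :: rest := by rw [← hFE, hfb]
    have hbound := freeB_bounds g
    have hnd := freeB_nodup g
    have hlen64 := freeB_len g
    rw [hfb] at hbound hnd hlen64
    unfold is_split is_split_alt
    rw [hfb, dif_neg hA]
    have hshead : s = (freeA g).head hA := by
      have haux : ∀ (l : List Int) (h1 : l ≠ []), l = s :: rest → s = l.head h1 := by
        rintro l h1 rfl; rfl
      exact haux _ hA hAE
    have hlen1 : (flood_fill_count (freeA g) ((freeA g).head hA)).length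
          = (sweeps (s :: rest) 64 [s]).length := by
      refine List.Perm.length_eq ?_
      refine (List.perm_ext_iff_of_nodup (floodfill_nodup _ _)
        (sweeps_nodup _ hnd 64 [s] (List.nodup_singleton s))).2 ?_
      intro a
      rw [floodfill_mem (freeA g) ((freeA g).head hA) (List.head_mem hA) a,
          sweeps_char (s :: rest) s hnd List.mem_cons_self hbound hlen64 a,
          ← hshead, hAE]
    have key : ∀ (a b n m : ℕ) (x y : Bool), a = b → n = m → x = y →
        ((if a < n then true else x) = (if b < m then true else y)) := by
      intro a b n m x y ha hb hc
      subst ha; subst hb; subst hc; rfl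
    apply key
    · exact hlen1
    · rw [hAE]
    · simp
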